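-- pv_equiv track=rewrite | github.com/max-passion/plugin-modernizer-tool | scripts/update_metadata.py | summarize_check_runs
-- ===== SOURCE A (Python) =====
-- def summarize_check_runs(checks_summary):
--     conclusions = list(checks_summary.values())
--
--     if any(c is None for c in conclusions):
--         return 'pending'
--     elif any(c in ['failure', 'timed_out', 'cancelled'] for c in conclusions):
--         return 'failure'
--     elif all(c == 'success' for c in conclusions):
--         return 'success'
--     else:
--         return 'neutral'  # fallback if mixed states like 'neutral', 'skipped', etc.
-- ===== SOURCE B (Python) =====
-- def summarize_check_runs(checks_summary):
--     RANK = {'failure': 2, 'timed_out': 2, 'cancelled': 2, 'success': 0}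
--     worst = 0
--     for c in checks_summary.values():
--         worst = max(worst, 3 if c is None else RANK.get(c, 1))
--     return ('success', 'neutral', 'failure', 'pending')[worst]
-- ===== Notes on version B (the rewrite author's own statement) =====
-- stated objective: alternative
-- what changed: Replaces A's priority-ordered any/any/all boolean scans with a numeric severity reduction: each conclusion is mapped to a rank (None=3, failure-like=2, success=0, other=1), the maximum rank is folded over the values, and the result is a table lookup by that maximum.
import Mathlib
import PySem

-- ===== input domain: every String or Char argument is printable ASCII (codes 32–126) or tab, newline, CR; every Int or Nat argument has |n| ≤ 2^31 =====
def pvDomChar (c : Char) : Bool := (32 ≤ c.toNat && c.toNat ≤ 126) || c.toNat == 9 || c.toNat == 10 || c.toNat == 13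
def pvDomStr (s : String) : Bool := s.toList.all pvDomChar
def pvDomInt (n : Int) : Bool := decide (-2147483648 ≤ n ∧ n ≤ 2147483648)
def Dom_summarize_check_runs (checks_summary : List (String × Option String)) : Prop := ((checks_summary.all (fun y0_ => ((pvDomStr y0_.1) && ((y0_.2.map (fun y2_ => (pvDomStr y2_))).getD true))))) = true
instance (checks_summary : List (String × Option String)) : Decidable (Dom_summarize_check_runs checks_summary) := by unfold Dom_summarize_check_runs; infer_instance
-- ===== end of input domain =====

-- B replaces A's priority-ordered any/any/all boolean scans by a numeric severity maximum plus a table lookup; objective: alternative algorithm, same cost.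

-- ===== PORT A =====
-- conclusions = list(checks_summary.values()); three scans in priority order
def summarize_check_runs (checks_summary : List (String × Option String)) : String :=
  let conclusions := (PySem.Dict.ofList checks_summary).values
  if conclusions.any (fun c => c == none) then "pending"
  else if conclusions.any (fun c => [some "failure", some "timed_out", some "cancelled"].contains c) then "failure"
  else if conclusions.all (fun c => c == some "success") then "success"
  else "neutral"

-- ===== PORT B =====
-- RANK = {'failure': 2, 'timed_out': 2, 'cancelled': 2, 'success': 0}
def pvRank : PySem.Dict String Nat :=
  PySem.Dict.ofList [("failure", 2), ("timed_out", 2), ("cancelled", 2), ("success", 0)]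

-- one fold computing the maximum severity, then tuple indexing
-- (worst ≤ 3 always holds, so the in-range tuple index t[worst] is ported as getD; the default is never used)
def summarize_check_runs_alt (checks_summary : List (String × Option String)) : String :=
  let worst := ((PySem.Dict.ofList checks_summary).values).foldl
    (fun w c => max w (match c with | none => 3 | some s => pvRank.getD s 1)) 0
  ["success", "neutral", "failure", "pending"].getD worst ""

-- ===== PRECONDITION & SPEC =====
def Spec_summarize_check_runs (checks_summary : List (String × Option String)) (out : String) : Prop := out = summarize_check_runs_alt checks_summary
instance (checks_summary : List (String × Option String)) (out : String) : Decidable (Spec_summarize_check_runs checks_summary out) := by unfold Spec_summarize_check_runs; infer_instance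

-- ===== CLAIM (what is proved, stated in full; the proofs are below) =====
def Claim_equal_summarize_check_runs : Prop := ∀ (checks_summary : List (String × Option String)), Dom_summarize_check_runs checks_summary → Spec_summarize_check_runs checks_summary (summarize_check_runs checks_summary)

-- ===== LEMMAS AND PROOFS =====

-- B's rank of one conclusion, named for the proofs
def pvR (c : Option String) : Nat :=
  match c with | none => 3 | some s => pvRank.getD s 1

-- A's three scans condensed into the severity number B's fold computes
def pvChain (l : List (Option String)) : Nat :=
  if l.any (fun c => c == none) then 3
  else if l.any (fun c => [some "failure", some "timed_out", some "cancelled"].contains c) then 2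
  else if l.all (fun c => c == some "success") then 0
  else 1

theorem pvR_other (s : String) (h1 : s ≠ "failure") (h2 : s ≠ "timed_out")
    (h3 : s ≠ "cancelled") (h4 : s ≠ "success") : pvR (some s) = 1 := by
  have hmk : pvRank = PySem.Dict.mk [("failure", 2), ("timed_out", 2), ("cancelled", 2), ("success", 0)] := by decide
  have e1 : ("failure" == s) = false := beq_eq_false_iff_ne.mpr (Ne.symm h1)
  have e2 : ("timed_out" == s) = false := beq_eq_false_iff_ne.mpr (Ne.symm h2)
  have e3 : ("cancelled" == s) = false := beq_eq_false_iff_ne.mpr (Ne.symm h3)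
  have e4 : ("success" == s) = false := beq_eq_false_iff_ne.mpr (Ne.symm h4)
  simp [pvR, hmk, PySem.Dict.getD, e1, e2, e3, e4, PySem.Dict.get?]

set_option maxRecDepth 8000 in
theorem pvR_cons (c : Option String) (t : List (Option String)) :
    max (pvR c) (pvChain t) = pvChain (c :: t) := by
  by_cases hn : (t.any fun c => c == none) = true <;>
    by_cases hf : (t.any fun c => [some "failure", some "timed_out", some "cancelled"].contains c) = true <;>
      by_cases ha : (t.all fun c => c == some "success") = true <;>
  · rcases c with _ | s
    · rw [show pvR none = 3 from rfl]
      simp_all [pvChain, List.any_cons] <;> split_ifs <;> simp_all <;> omega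
    · by_cases h1 : s = "failure"
      · subst h1
        rw [show pvR (some "failure") = 2 from by decide]
        simp_all [pvChain, List.any_cons] <;> split_ifs <;> simp_all <;> omega
      · by_cases h2 : s = "timed_out"
        · subst h2
          clear h1
          rw [show pvR (some "timed_out") = 2 from by decide]
          simp_all [pvChain, List.any_cons] <;> split_ifs <;> simp_all <;> omega
        · by_cases h3 : s = "cancelled"
          · subst h3
            clear h1 h2
            rw [show pvR (some "cancelled") = 2 from by decide]
            simp_all [pvChain, List.any_cons] <;> split_ifs <;> simp_all <;> omega
          · by_cases h4 : s = "success"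
            · subst h4
              clear h1 h2 h3
              rw [show pvR (some "success") = 0 from by decide]
              simp_all [pvChain, List.any_cons, List.all_cons] <;> split_ifs <;> simp_all <;> omega
            · rw [pvR_other s h1 h2 h3 h4]
              have hm : ([some "failure", some "timed_out", some "cancelled"].contains (some s)) = false := by
                simp [h1, h2, h3]
              have hs0 : ((some s == some "success") : Bool) = false := by simp [h4]
              clear h1 h2 h3 h4
              simp_all [pvChain, List.any_cons, List.all_cons] <;> split_ifs <;> simp_all <;> omega

-- B's fold computes max w (pvChain l)
theorem pv_fold_eq (l : List (Option String)) (w : Nat) :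
    l.foldl (fun w c => max w (pvR c)) w = max w (pvChain l) := by
  induction l generalizing w with
  | nil => simp [pvChain]
  | cons c t ih =>
      simp only [List.foldl_cons, ih, Nat.max_assoc, pvR_cons]

-- ===== VERDICT (by name: the statement is the Claim_ definition above) =====
theorem summarize_check_runs_spec : Claim_equal_summarize_check_runs := by
  intro checks_summary _
  unfold Spec_summarize_check_runs summarize_check_runs summarize_check_runs_alt
  dsimp only
  have h := pv_fold_eq ((PySem.Dict.ofList checks_summary).values) 0
  simp only [pvR] at h
  rw [h]
  unfold pvChain
  split_ifs <;> rfl
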